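-- pv_equiv track=rewrite | github.com/borjatarraso/lynx-compare | lynx_compare/engine.py | _ordinal_value
-- ===== SOURCE A (Python) =====
-- from typing import Optional
--
-- ORDINAL_RANKS: dict[str, list[str]] = {
--     "roic_consistency":       ["None", "Weak", "Moderate", "Strong"],
--     "margin_stability":       ["Volatile", "Moderate", "Stable", "Very Stable"],
--     "revenue_predictability": ["Declining", "Variable", "Positive", "Consistent", "Strong"],
--     "competitive_position":   ["No Moat", "Weak", "Narrow", "Wide"],
-- }
--
-- _GENERIC_RANK = ["None", "No", "Weak", "Low", "Unlikely", "Possible",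
--                  "Moderate", "Medium", "Likely", "High", "Strong",
--                  "Very High", "Very Strong", "Wide"]
--
-- def _ordinal_value(key: str, val: Optional[str]) -> Optional[int]:
--     """Convert a qualitative string to an ordinal rank (higher = better).
--
--     Uses substring matching so that descriptive values like
--     "Very Stable (High)" match the rank "Very Stable".
--     """
--     if val is None:
--         return None
--     ranks = ORDINAL_RANKS.get(key, _GENERIC_RANK)
--     normalized = val.strip().lower()
--     # Try exact match first, then substring (longest match wins).
--     best_rank = None
--     best_len = 0
--     for i, r in enumerate(ranks):
--         rl = r.lower()
--         if rl == normalized: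
--             return i
--         if rl in normalized and len(rl) > best_len:
--             best_rank = i
--             best_len = len(rl)
--     return best_rank
-- ===== SOURCE B (Python) =====
-- from typing import Optional
--
-- ORDINAL_RANKS: dict[str, list[str]] = {
--     "roic_consistency":       ["None", "Weak", "Moderate", "Strong"],
--     "margin_stability":       ["Volatile", "Moderate", "Stable", "Very Stable"],
--     "revenue_predictability": ["Declining", "Variable", "Positive", "Consistent", "Strong"],
--     "competitive_position":   ["No Moat", "Weak", "Narrow", "Wide"],
-- }
--
-- _GENERIC_RANK = ["None", "No", "Weak", "Low", "Unlikely", "Possible",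
--                  "Moderate", "Medium", "Likely", "High", "Strong",
--                  "Very High", "Very Strong", "Wide"]
--
-- def _ordinal_value(key: str, val: Optional[str]) -> Optional[int]:
--     """Longest substring match wins, earliest index breaks ties (exact match is
--     just the maximal-length substring case); sort once, take the first hit."""
--     if val is None:
--         return None
--     normalized = val.strip().lower()
--     pairs = [(i, r.lower()) for i, r in enumerate(ORDINAL_RANKS.get(key, _GENERIC_RANK))]
--     pairs.sort(key=lambda p: len(p[1]), reverse=True)  # stable: ties keep index order
--     for i, rl in pairs:
--         if rl in normalized:
--             return i
--     return None
-- ===== Notes on version B (the rewrite author's own statement) =====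
-- stated objective: alternative
-- what changed: Replaced the running-best scan with early exact-match return by a stable descending-length sort of the (index, lowered rank) pairs followed by first-substring-match, using that an exact match is just the maximal-length substring case.
import Mathlib
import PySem

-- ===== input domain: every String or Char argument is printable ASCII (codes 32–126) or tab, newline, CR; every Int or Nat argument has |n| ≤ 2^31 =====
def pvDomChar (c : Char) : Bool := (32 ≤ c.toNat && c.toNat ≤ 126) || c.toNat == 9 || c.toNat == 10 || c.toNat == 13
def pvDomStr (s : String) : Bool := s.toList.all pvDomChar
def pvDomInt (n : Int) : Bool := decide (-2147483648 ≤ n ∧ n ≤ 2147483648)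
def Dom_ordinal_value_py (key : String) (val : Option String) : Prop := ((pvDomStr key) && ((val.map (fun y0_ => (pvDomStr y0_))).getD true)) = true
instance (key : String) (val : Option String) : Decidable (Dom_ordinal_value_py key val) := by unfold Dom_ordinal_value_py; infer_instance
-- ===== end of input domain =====

-- B replaces A's running-best scan (with early exact-match return) by a stable descending-length
-- sort of the (index, lowered rank) pairs followed by the first substring match (objective: alternative).

-- ===== PORT A =====
def pvOrdinalRanks : PySem.Dict String (List String) :=
  PySem.Dict.ofList [
    ("roic_consistency", ["None", "Weak", "Moderate", "Strong"]),
    ("margin_stability", ["Volatile", "Moderate", "Stable", "Very Stable"]),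
    ("revenue_predictability", ["Declining", "Variable", "Positive", "Consistent", "Strong"]),
    ("competitive_position", ["No Moat", "Weak", "Narrow", "Wide"])]

def pvGenericRank : List String :=
  ["None", "No", "Weak", "Low", "Unlikely", "Possible", "Moderate", "Medium",
   "Likely", "High", "Strong", "Very High", "Very Strong", "Wide"]

-- the 'for i, r in enumerate(ranks)' loop: early return on exact match, running best otherwise
def pvALoop (normalized : List Char) : List (Int × String) → Option Int → Nat → Option Int
  | [], best, _ => best
  | (i, r) :: rest, best, bestLen =>
    let rl := PySem.Chars.lower r.toList
    if rl = normalized then some i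
    else if PySem.Chars.isIn rl normalized && decide (rl.length > bestLen) then
      pvALoop normalized rest (some i) rl.length
    else
      pvALoop normalized rest best bestLen

def ordinal_value_py (key : String) (val : Option String) : Option Int :=
  match val with
  | none => none
  | some v =>
    let ranks := PySem.Dict.getD pvOrdinalRanks key pvGenericRank
    let normalized := PySem.Chars.lower (PySem.Chars.strip v.toList)
    pvALoop normalized (PySem.List.enumerate ranks) none 0

-- ===== PORT B =====
-- first substring match in the sorted pair list
def pvBFind (normalized : List Char) : List (Int × List Char) → Option Int
  | [] => none
  | (i, rl) :: rest =>
    if PySem.Chars.isIn rl normalized then some i else pvBFind normalized rest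

def ordinal_value_py_alt (key : String) (val : Option String) : Option Int :=
  match val with
  | none => none
  | some v =>
    let normalized := PySem.Chars.lower (PySem.Chars.strip v.toList)
    let pairs := (PySem.List.enumerate (PySem.Dict.getD pvOrdinalRanks key pvGenericRank)).map
      (fun p => (p.1, PySem.Chars.lower p.2.toList))
    pvBFind normalized (PySem.List.sorted pairs (fun p => p.2.length) true)

-- ===== PRECONDITION & SPEC =====
def Spec_ordinal_value_py (key : String) (val : Option String) (out : Option Int) : Prop := out = ordinal_value_py_alt key val
instance (key : String) (val : Option String) (out : Option Int) : Decidable (Spec_ordinal_value_py key val out) := by unfold Spec_ordinal_value_py; infer_instance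

-- ===== CLAIM (what is proved, stated in full; the proofs are below) =====
def Claim_equal_ordinal_value_py : Prop := ∀ (key : String) (val : Option String), Dom_ordinal_value_py key val → Spec_ordinal_value_py key val (ordinal_value_py key val)

-- ===== LEMMAS AND PROOFS =====

-- A's scan without the early exact-match return (proof-side reference loop)
def pvNoEx (n : List Char) : List (Int × List Char) → Option Int → Nat → Option Int
  | [], best, _ => best
  | (i, rl) :: rest, best, blen =>
    if PySem.Chars.isIn rl n && decide (rl.length > blen) then pvNoEx n rest (some i) rl.length
    else pvNoEx n rest best blen

-- strict order the sorted pair list satisfies: longer first, index order among equal lengths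
def pvDesc (a b : Int × List Char) : Bool :=
  decide (b.2.length < a.2.length ∨ (b.2.length = a.2.length ∧ a.1 < b.1))

lemma pv_isIn_len {rl n : List Char} (h : PySem.Chars.isIn rl n = true) : rl.length ≤ n.length := by
  exact ((PySem.Chars.isIn_iff_infix rl n).1 h).sublist.length_le

lemma pv_isIn_eq {rl n : List Char} (h : PySem.Chars.isIn rl n = true)
    (hl : n.length ≤ rl.length) : rl = n := by
  exact ((PySem.Chars.isIn_iff_infix rl n).1 h).sublist.eq_of_length (le_antisymm (pv_isIn_len h) hl)

lemma pvNoEx_cap (n : List Char) : ∀ (l : List (Int × List Char)) best blen,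
    n.length ≤ blen → pvNoEx n l best blen = best := by
  intro l
  induction l with
  | nil => intro best blen _; rfl
  | cons p rest ih =>
    intro best blen hle
    obtain ⟨i, rl⟩ := p
    have hcond : (PySem.Chars.isIn rl n && decide (rl.length > blen)) = false := by
      by_cases h : PySem.Chars.isIn rl n = true
      · have := pv_isIn_len h
        simp [h, Nat.not_lt.2 (le_trans this hle)]
      · simp [Bool.eq_false_iff.2 h]
    simpa [pvNoEx, hcond] using ih best blen hle

lemma pvALoop_eq (n : List Char) : ∀ (l : List (Int × String)) best blen,
    (∀ p ∈ l, PySem.Chars.lower p.2.toList ≠ []) → (blen = 0 ∨ blen < n.length) →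
    pvALoop n l best blen =
      pvNoEx n (l.map (fun p => (p.1, PySem.Chars.lower p.2.toList))) best blen := by
  intro l
  induction l with
  | nil => intro best blen _ _; rfl
  | cons p rest ih =>
    intro best blen hne hblen
    obtain ⟨i, r⟩ := p
    by_cases hx : PySem.Chars.lower r.toList = n
    · have hnnil : PySem.Chars.lower r.toList ≠ [] := hne _ (List.mem_cons_self)
      have hpos : 0 < n.length := by
        rw [← hx]; exact List.length_pos_iff.2 hnnil
      have hlt : blen < n.length := by
        rcases hblen with h0 | h; · omega
        · exact h
      have hin : PySem.Chars.isIn n n = true :=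
        (PySem.Chars.isIn_iff_infix n n).2 List.infix_rfl
      have hcond : (PySem.Chars.isIn n n && decide (n.length > blen)) = true := by
        rw [hin]; simpa using hlt
      simp only [pvALoop, pvNoEx, List.map_cons, hx]
      rw [if_true]  -- exact-match branch taken
      rw [if_pos hcond]
      exact (pvNoEx_cap n _ _ _ (le_refl _)).symm
    · by_cases hc : PySem.Chars.isIn (PySem.Chars.lower r.toList) n = true ∧
          blen < (PySem.Chars.lower r.toList).length
      · have hlen : (PySem.Chars.lower r.toList).length < n.length := by
          have hle := pv_isIn_len hc.1
          rcases Nat.lt_or_ge (PySem.Chars.lower r.toList).length n.length with h | h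
          · exact h
          · exact absurd (pv_isIn_eq hc.1 h) hx
        simp only [pvALoop, pvNoEx, List.map_cons, if_neg hx]
        rw [if_pos (by simp [hc.1, hc.2]), if_pos (by simp [hc.1, hc.2])]
        exact ih _ _ (fun q hq => hne q (List.mem_cons_of_mem _ hq)) (Or.inr hlen)
      · simp only [pvALoop, pvNoEx, List.map_cons, if_neg hx]
        rw [if_neg (by simpa [Decidable.not_and_iff_or_not] using hc),
            if_neg (by simpa [Decidable.not_and_iff_or_not] using hc)]
        exact ih _ _ (fun q hq => hne q (List.mem_cons_of_mem _ hq)) hblen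

lemma pvNoEx_char (n : List Char) : ∀ (l : List (Int × List Char)) best blen,
    l.Pairwise (fun a b => a.1 < b.1) →
    ((∀ p ∈ l, ¬(PySem.Chars.isIn p.2 n = true ∧ blen < p.2.length)) ∧
        pvNoEx n l best blen = best) ∨
    (∃ i rl, (i, rl) ∈ l ∧ PySem.Chars.isIn rl n = true ∧ blen < rl.length ∧
        (∀ q ∈ l, PySem.Chars.isIn q.2 n = true → blen < q.2.length →
          (q.2.length < rl.length ∨ (q.2.length = rl.length ∧ i ≤ q.1))) ∧
        pvNoEx n l best blen = some i) := by
  intro l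
  induction l with
  | nil => intro best blen _; exact Or.inl ⟨by simp, rfl⟩
  | cons p rest ih =>
    intro best blen hpw
    obtain ⟨i, sl⟩ := p
    have hhd := (List.pairwise_cons.1 hpw).1
    have htl := (List.pairwise_cons.1 hpw).2
    by_cases hc : PySem.Chars.isIn sl n = true ∧ blen < sl.length
    · have hstep : pvNoEx n ((i, sl) :: rest) best blen = pvNoEx n rest (some i) sl.length := by
        simp [pvNoEx, hc.1, hc.2]
      rcases ih (some i) sl.length htl with ⟨hno, heq⟩ | ⟨j, rl, hmem, hin, hlt, hmax, heq⟩
      · refine Or.inr ⟨i, sl, List.mem_cons_self, hc.1, hc.2, ?_, by rw [hstep, heq]⟩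
        intro q hq hqin hqlen
        rcases List.mem_cons.1 hq with rfl | hq
        · exact Or.inr ⟨rfl, le_refl _⟩
        · rcases Nat.lt_or_ge q.2.length sl.length with h | h
          · exact Or.inl h
          · rcases Nat.lt_or_ge sl.length q.2.length with h' | h'
            · exact absurd ⟨hqin, h'⟩ (hno q hq)
            · exact Or.inr ⟨le_antisymm h' h, le_of_lt (hhd q hq)⟩
      · refine Or.inr ⟨j, rl, List.mem_cons_of_mem _ hmem, hin, lt_trans hc.2 hlt, ?_,
          by rw [hstep, heq]⟩
        intro q hq hqin hqlen
        rcases List.mem_cons.1 hq with rfl | hq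
        · exact Or.inl hlt
        · rcases Nat.lt_or_ge sl.length q.2.length with h | h
          · exact hmax q hq hqin h
          · exact Or.inl (lt_of_le_of_lt h hlt)
    · have hstep : pvNoEx n ((i, sl) :: rest) best blen = pvNoEx n rest best blen := by
        have : (PySem.Chars.isIn sl n && decide (sl.length > blen)) = false := by
          by_cases h : PySem.Chars.isIn sl n = true
          · have : ¬ blen < sl.length := fun hl => hc ⟨h, hl⟩
            simp [h, this]
          · simp [Bool.eq_false_iff.2 h]
        simp [pvNoEx, this]
      rcases ih best blen htl with ⟨hno, heq⟩ | ⟨j, rl, hmem, hin, hlt, hmax, heq⟩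
      · refine Or.inl ⟨?_, by rw [hstep, heq]⟩
        intro q hq
        rcases List.mem_cons.1 hq with rfl | hq
        · exact hc
        · exact hno q hq
      · refine Or.inr ⟨j, rl, List.mem_cons_of_mem _ hmem, hin, hlt, ?_, by rw [hstep, heq]⟩
        intro q hq hqin hqlen
        rcases List.mem_cons.1 hq with rfl | hq
        · exact absurd ⟨hqin, hqlen⟩ hc
        · exact hmax q hq hqin hqlen

lemma pvBFind_eq_none (n : List Char) : ∀ (qs : List (Int × List Char)),
    (∀ p ∈ qs, PySem.Chars.isIn p.2 n = false) → pvBFind n qs = none := by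
  intro qs
  induction qs with
  | nil => intro _; rfl
  | cons p rest ih =>
    intro h
    obtain ⟨i, rl⟩ := p
    have h0 := h _ List.mem_cons_self
    simp only [pvBFind, h0, Bool.false_eq_true, if_false]
    exact ih fun q hq => h q (List.mem_cons_of_mem _ hq)

lemma pvBFind_ne_none (n : List Char) : ∀ (qs : List (Int × List Char)) (p : Int × List Char),
    p ∈ qs → PySem.Chars.isIn p.2 n = true → pvBFind n qs ≠ none := by
  intro qs
  induction qs with
  | nil => intro p hp _; exact absurd hp (List.not_mem_nil)
  | cons r rest ih =>
    intro p hp hpin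
    obtain ⟨a, b⟩ := r
    by_cases hb : PySem.Chars.isIn b n = true
    · simp [pvBFind, hb]
    · rcases List.mem_cons.1 hp with rfl | hp'
      · exact absurd hpin (by simpa using hb)
      · simpa [pvBFind, hb] using ih p hp' hpin

lemma pvBFind_char (n : List Char) : ∀ (qs : List (Int × List Char)) (i : Int),
    qs.Pairwise (fun a b => pvDesc a b = true) → pvBFind n qs = some i →
    ∃ rl, (i, rl) ∈ qs ∧ PySem.Chars.isIn rl n = true ∧
      ∀ q ∈ qs, PySem.Chars.isIn q.2 n = true →
        (q.2.length < rl.length ∨ (q.2.length = rl.length ∧ i ≤ q.1)) := by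
  intro qs
  induction qs with
  | nil => intro i _ h; exact absurd h (by simp [pvBFind])
  | cons p rest ih =>
    intro i hpw hfind
    obtain ⟨j, sl⟩ := p
    have hhd := (List.pairwise_cons.1 hpw).1
    have htl := (List.pairwise_cons.1 hpw).2
    by_cases hin : PySem.Chars.isIn sl n = true
    · have : i = j := by
        have : some j = some i := by simpa [pvBFind, hin] using hfind
        exact (Option.some.injEq _ _ ▸ this).symm
      subst this
      refine ⟨sl, List.mem_cons_self, hin, ?_⟩
      intro q hq _
      rcases List.mem_cons.1 hq with rfl | hq
      · exact Or.inr ⟨rfl, le_refl _⟩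
      · have h := hhd q hq
        simp only [pvDesc, decide_eq_true_eq] at h
        rcases h with h | ⟨h1, h2⟩
        · exact Or.inl h
        · exact Or.inr ⟨h1, le_of_lt h2⟩
    · have hfind' : pvBFind n rest = some i := by
        simpa [pvBFind, hin] using hfind
      obtain ⟨rl, hmem, hrin, hmax⟩ := ih i htl hfind'
      refine ⟨rl, List.mem_cons_of_mem _ hmem, hrin, ?_⟩
      intro q hq hqin
      rcases List.mem_cons.1 hq with rfl | hq
      · exact absurd hqin (by simpa using hin)
      · exact hmax q hq hqin

theorem pvMain (n : List Char) (ps : List (Int × String))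
    (hne : ∀ p ∈ ps.map (fun p => (p.1, PySem.Chars.lower p.2.toList)), p.2 ≠ ([] : List Char))
    (hpair : (ps.map (fun p => (p.1, PySem.Chars.lower p.2.toList))).Pairwise (fun a b => a.1 < b.1))
    (hdesc : (PySem.List.sorted (ps.map (fun p => (p.1, PySem.Chars.lower p.2.toList)))
        (fun p => p.2.length) true).Pairwise (fun a b => pvDesc a b = true)) :
    pvALoop n ps none 0 =
      pvBFind n (PySem.List.sorted (ps.map (fun p => (p.1, PySem.Chars.lower p.2.toList)))
        (fun p => p.2.length) true) := by
  set l := ps.map (fun p => (p.1, PySem.Chars.lower p.2.toList)) with hl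
  set qs := PySem.List.sorted l (fun p => p.2.length) true with hqs
  have hperm : qs.Perm l := PySem.List.sorted_perm l _ true
  have hne' : ∀ p ∈ ps, PySem.Chars.lower p.2.toList ≠ [] := by
    intro p hp
    exact hne (p.1, PySem.Chars.lower p.2.toList) (List.mem_map.2 ⟨p, hp, rfl⟩)
  rw [pvALoop_eq n ps none 0 hne' (Or.inl rfl), ← hl]
  rcases pvNoEx_char n l none 0 hpair with ⟨hno, heq⟩ | ⟨i, rl, hmem, hin, _, hmax, heq⟩
  · rw [heq]
    refine (pvBFind_eq_none n qs ?_).symm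
    intro p hp
    have hpl : p ∈ l := hperm.mem_iff.1 hp
    by_cases h : PySem.Chars.isIn p.2 n = true
    · have hpos : 0 < p.2.length := List.length_pos_iff.2 (hne p hpl)
      exact absurd ⟨h, hpos⟩ (hno p hpl)
    · exact Bool.eq_false_iff.2 h
  · rw [heq]
    -- B's find cannot be none: (i, rl) is a match present in qs
    cases hbf : pvBFind n qs with
    | none => exact absurd hbf (pvBFind_ne_none n qs (i, rl) (hperm.mem_iff.2 hmem) hin)
    | some j =>
      obtain ⟨sl, hjm, hjin, hjmax⟩ := pvBFind_char n qs j hdesc hbf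
      have hjl : (j, sl) ∈ l := hperm.mem_iff.1 hjm
      have hslpos : 0 < sl.length := List.length_pos_iff.2 (hne (j, sl) hjl)
      have h1 := hmax (j, sl) hjl hjin hslpos
      have h2 := hjmax (i, rl) (hperm.mem_iff.2 hmem) hin
      have : i = j := by
        dsimp only at h1 h2
        rcases h1 with h1 | ⟨h1a, h1b⟩ <;> rcases h2 with h2 | ⟨h2a, h2b⟩ <;> omega
      rw [this]

lemma pvRanksCases (key : String) :
    PySem.Dict.getD pvOrdinalRanks key pvGenericRank = ["None", "Weak", "Moderate", "Strong"] ∨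
    PySem.Dict.getD pvOrdinalRanks key pvGenericRank = ["Volatile", "Moderate", "Stable", "Very Stable"] ∨
    PySem.Dict.getD pvOrdinalRanks key pvGenericRank = ["Declining", "Variable", "Positive", "Consistent", "Strong"] ∨
    PySem.Dict.getD pvOrdinalRanks key pvGenericRank = ["No Moat", "Weak", "Narrow", "Wide"] ∨
    PySem.Dict.getD pvOrdinalRanks key pvGenericRank = pvGenericRank := by
  by_cases h1 : key = "roic_consistency"
  · subst h1; exact Or.inl (by decide)
  by_cases h2 : key = "margin_stability"
  · subst h2; exact Or.inr (Or.inl (by decide))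
  by_cases h3 : key = "revenue_predictability"
  · subst h3; exact Or.inr (Or.inr (Or.inl (by decide)))
  by_cases h4 : key = "competitive_position"
  · subst h4; exact Or.inr (Or.inr (Or.inr (Or.inl (by decide))))
  · refine Or.inr (Or.inr (Or.inr (Or.inr ?_)))
    have hmk : pvOrdinalRanks = PySem.Dict.mk [
        ("roic_consistency", ["None", "Weak", "Moderate", "Strong"]),
        ("margin_stability", ["Volatile", "Moderate", "Stable", "Very Stable"]),
        ("revenue_predictability", ["Declining", "Variable", "Positive", "Consistent", "Strong"]),
        ("competitive_position", ["No Moat", "Weak", "Narrow", "Wide"])] := by decide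
    simp [PySem.Dict.getD, hmk, PySem.Dict.get?, beq_iff_eq,
      Ne.symm h1, Ne.symm h2, Ne.symm h3, Ne.symm h4]

-- ===== VERDICT (by name: the statement is the Claim_ definition above) =====
theorem ordinal_value_py_spec : Claim_equal_ordinal_value_py := by
  intro key val _
  unfold Spec_ordinal_value_py
  cases val with
  | none => rfl
  | some v =>
    show pvALoop _ _ none 0 = pvBFind _ _
    rcases pvRanksCases key with h | h | h | h | h <;> rw [h] <;>
      exact pvMain _ _ (by decide) (by decide) (by decide)
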